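-- pv_equiv track=rewrite | github.com/miliar/Code_Jam_Webscraper | solutions_python/Problem_200/1306.py | change_pos
-- ===== SOURCE A (Python) =====
-- def is_tidy(X):
--     """ returns 0 if tidy else index of violating element """
--
--     last = '1'
--     for i,x in enumerate(X):
--         if x < last:
--             return i
--         last = x
--     return 0
--
-- def change_pos(X):
--
--     pos = is_tidy(X)
--     skip_to = len(X) - pos
--     cpos = 0
--
--     last = '9'
--     for i,e in enumerate(reversed(X)):
--       if i < skip_to:
--           last = e
--           continue
--       if e < last:
--           cpos = len(X) - i
--           break
--       last = e
--
--     return cpos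
-- ===== SOURCE B (Python) =====
-- def change_pos(X):
--     # Single left-to-right pass: track the index of the most recent ascent;
--     # on the first descent (with the same '1' sentinel) return it.
--     last = '1'
--     cpos = 0
--     for i, x in enumerate(X):
--         if x < last:
--             return cpos
--         if i > 0 and last < x:
--             cpos = i
--         last = x
--     return 0
-- ===== Notes on version B (the rewrite author's own statement) =====
-- stated objective: simpler
-- what changed: Replaces A's two passes (a forward is_tidy scan plus a reversed scan with a skip window) by one left-to-right pass that records the most recent ascent index and returns it at the first descent.
import Mathlib
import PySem

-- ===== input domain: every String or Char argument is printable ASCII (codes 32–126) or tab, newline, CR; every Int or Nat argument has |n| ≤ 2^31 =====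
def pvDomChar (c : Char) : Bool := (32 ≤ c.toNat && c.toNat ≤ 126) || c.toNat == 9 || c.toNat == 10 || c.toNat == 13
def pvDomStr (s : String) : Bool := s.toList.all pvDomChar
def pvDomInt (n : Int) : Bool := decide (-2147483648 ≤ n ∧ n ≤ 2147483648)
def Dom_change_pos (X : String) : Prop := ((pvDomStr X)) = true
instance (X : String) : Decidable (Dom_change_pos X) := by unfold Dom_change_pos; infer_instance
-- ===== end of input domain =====

-- B merges A's two scans into one forward pass (simpler); return values proved equal.

-- ===== PORT A =====
-- is_tidy: forward scan, returns index of first violating element (0 if tidy)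
def isTidyGo : List Char → Char → Int → Int
  | [], _, _ => 0
  | x :: rest, last, i => if x < last then i else isTidyGo rest x (i + 1)

-- the reversed loop of change_pos: skip while i < skip_to, then break on e < last
def revGo (len skip_to : Int) : List Char → Char → Int → Int
  | [], _, _ => 0
  | e :: rest, last, i =>
    if i < skip_to then revGo len skip_to rest e (i + 1)
    else if e < last then len - i
    else revGo len skip_to rest e (i + 1)

def change_pos (X : String) : Int :=
  let pos := isTidyGo X.toList '1' 0
  let skip_to := (X.toList.length : Int) - pos
  revGo (X.toList.length : Int) skip_to X.toList.reverse '9' 0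

-- ===== PORT B =====
-- single forward pass: cpos = most recent ascent index; first descent returns cpos
def altGo : List Char → Char → Int → Int → Int
  | [], _, _, _ => 0
  | x :: rest, last, cpos, i =>
    if x < last then cpos
    else altGo rest x (if 0 < i ∧ last < x then i else cpos) (i + 1)

def change_pos_alt (X : String) : Int := altGo X.toList '1' 0 0

-- ===== PRECONDITION & SPEC =====
def Spec_change_pos (X : String) (out : Int) : Prop := out = change_pos_alt X
instance (X : String) (out : Int) : Decidable (Spec_change_pos X out) := by unfold Spec_change_pos; infer_instance

-- ===== CLAIM (what is proved, stated in full; the proofs are below) =====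
def Claim_equal_change_pos : Prop := ∀ (X : String), Dom_change_pos X → Spec_change_pos X (change_pos X)

-- ===== LEMMAS AND PROOFS =====

-- "no violation": each element is ≥ the previous (sentinel `last` first)
def NoViol : Char → List Char → Prop
  | _, [] => True
  | last, x :: r => ¬ x < last ∧ NoViol x r

-- B's loop state (last, cpos, i) as a fold
def fstep (s : Char × Int × Int) (x : Char) : Char × Int × Int :=
  (x, if 0 < s.2.2 ∧ s.1 < x then s.2.2 else s.2.1, s.2.2 + 1)

def fstate (m : List Char) (s : Char × Int × Int) : Char × Int × Int := m.foldl fstep s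

-- the scanning phase of A's reversed loop, with p = len - i
def bscan : List Char → Char → Int → Int
  | [], _, _ => 0
  | e :: rest, last, p => if e < last then p else bscan rest e (p - 1)

theorem fstate_fst : ∀ (m : List Char) (c : Char) (cp i : Int),
    (fstate m (c, cp, i)).1 = m.getLastD c := by
  intro m
  induction m with
  | nil => intro c cp i; rfl
  | cons x m ih =>
    intro c cp i
    simp only [fstate, List.foldl_cons, List.getLastD_cons]
    exact ih x _ _

theorem fstate_i : ∀ (m : List Char) (c : Char) (cp i : Int),
    (fstate m (c, cp, i)).2.2 = i + m.length := by
  intro m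
  induction m with
  | nil => intro c cp i; simp [fstate]
  | cons x m ih =>
    intro c cp i
    simp only [fstate, List.foldl_cons]
    rw [show List.foldl fstep (fstep (c, cp, i) x) m = fstate m (x, (fstep (c, cp, i) x).2.1, i + 1) from rfl]
    rw [ih]
    simp only [List.length_cons]
    push_cast
    omega

-- A's isTidy decomposition: either tidy, or first violation after a NoViol prefix m
theorem tidy_char : ∀ (l : List Char) (last : Char) (i : Int),
    (NoViol last l ∧ isTidyGo l last i = 0) ∨
    (∃ m v r, l = m ++ v :: r ∧ NoViol last m ∧ v < m.getLastD last ∧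
      isTidyGo l last i = i + m.length) := by
  intro l
  induction l with
  | nil => intro last i; left; exact ⟨trivial, rfl⟩
  | cons x rest ih =>
    intro last i
    by_cases h : x < last
    · right
      exact ⟨[], x, rest, rfl, trivial, h, by simp [isTidyGo, h]⟩
    · rcases ih x (i + 1) with ⟨hnv, heq⟩ | ⟨m, v, r, hl, hnv, hvlt, heq⟩
      · left
        exact ⟨⟨h, hnv⟩, by simp [isTidyGo, h, heq]⟩
      · right
        refine ⟨x :: m, v, r, by rw [hl]; rfl, ⟨h, hnv⟩, by rw [List.getLastD_cons]; exact hvlt, ?_⟩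
        simp only [isTidyGo, if_neg h, heq, List.length_cons]
        push_cast
        ring

-- skip phase: the first skip_to elements are consumed, last becomes their last element
theorem revGo_skip (len skip_to : Int) : ∀ (s t : List Char) (c : Char) (i : Int),
    i + s.length = skip_to →
    revGo len skip_to (s ++ t) c i = revGo len skip_to t (s.getLastD c) skip_to := by
  intro s
  induction s with
  | nil => intro t c i h; simp at h; rw [h]; rfl
  | cons e s ih =>
    intro t c i h
    have hi : i < skip_to := by
      simp only [List.length_cons] at h
      have : (0 : Int) ≤ (s.length : Int) := Int.natCast_nonneg _
      omega
    simp only [List.cons_append, revGo, if_pos hi, List.getLastD_cons]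
    apply ih
    simp only [List.length_cons] at h
    push_cast at h ⊢
    omega

-- scan phase equals bscan with p = len - i
theorem revGo_scan (len skip_to : Int) : ∀ (s : List Char) (c : Char) (i : Int),
    skip_to ≤ i → revGo len skip_to s c i = bscan s c (len - i) := by
  intro s
  induction s with
  | nil => intro c i h; rfl
  | cons e s ih =>
    intro c i h
    have hni : ¬ i < skip_to := by omega
    simp only [revGo, bscan, if_neg hni]
    by_cases he : e < c
    · simp [he]
    · simp only [if_neg he]
      rw [ih e (i + 1) (by omega)]
      ring_nf

-- central lemma: backward scan of m (with right neighbour a) vs forward cpos over m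
theorem bscan_rev : ∀ (m : List Char) (a c : Char),
    bscan m.reverse a (m.length : Int) =
      match m.getLast? with
      | some w => if w < a then (m.length : Int) else (fstate m (c, 0, 0)).2.1
      | none => (fstate m (c, 0, 0)).2.1 := by
  intro m
  induction m using List.reverseRecOn with
  | nil => intro a c; rfl
  | append_singleton m b ih =>
    intro a c
    rw [List.reverse_append]
    simp only [List.reverse_cons, List.reverse_nil, List.nil_append, List.cons_append,
      List.nil_append, List.getLast?_concat]
    by_cases hba : b < a
    · simp [bscan, hba]
    · simp only [bscan, if_neg hba, List.length_append, List.length_cons, List.length_nil]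
      have harith : ((m.length + (0 + 1) : Nat) : Int) - 1 = (m.length : Int) := by
        push_cast; ring
      rw [harith, ih b c]
      have hfold : fstate (m ++ [b]) (c, 0, 0) = fstep (fstate m (c, 0, 0)) b := by
        simp [fstate, List.foldl_append]
      rw [hfold]
      cases hm : m.getLast? with
      | none =>
        dsimp only
        have hm0 : m = [] := List.getLast?_eq_none_iff.mp hm
        subst hm0
        simp [fstate, fstep]
      | some w =>
        dsimp only
        have hmne : m ≠ [] := by
          intro h; subst h; simp at hm
        have hwD : m.getLastD c = w := by
          rw [List.getLastD_eq_getLast?, hm]; rfl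
        have hipos : (0 : Int) < (fstate m (c, 0, 0)).2.2 := by
          rw [fstate_i]
          have : 0 < m.length := List.length_pos_iff.mpr hmne
          omega
        by_cases hwb : w < b
        · rw [if_pos hwb]
          simp only [fstep]
          rw [if_pos ⟨hipos, by rw [fstate_fst, hwD]; exact hwb⟩]
          rw [fstate_i]
          ring
        · rw [if_neg hwb]
          simp only [fstep]
          rw [if_neg (by
            rintro ⟨-, hlt⟩
            rw [fstate_fst, hwD] at hlt
            exact hwb hlt)]

-- B on a NoViol list returns 0
theorem altGo_noViol : ∀ (l : List Char) (last : Char) (cpos i : Int),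
    NoViol last l → altGo l last cpos i = 0 := by
  intro l
  induction l with
  | nil => intro last cpos i _; rfl
  | cons x r ih =>
    intro last cpos i h
    obtain ⟨h1, h2⟩ := h
    simp only [altGo, if_neg h1]
    exact ih x _ _ h2

-- B on a NoViol prefix m followed by a violation v returns the fold's cpos
theorem altGo_viol : ∀ (m : List Char) (v : Char) (r : List Char) (last : Char) (cpos i : Int),
    NoViol last m → v < m.getLastD last →
    altGo (m ++ v :: r) last cpos i = (fstate m (last, cpos, i)).2.1 := by
  intro m
  induction m with
  | nil =>
    intro v r last cpos i _ hv
    simp only [List.getLastD] at hv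
    simp [altGo, hv, fstate]
  | cons x m ih =>
    intro v r last cpos i h hv
    obtain ⟨h1, h2⟩ := h
    simp only [List.getLastD_cons] at hv
    simp only [List.cons_append, altGo, if_neg h1]
    rw [ih v r x _ _ h2 hv]
    rfl

-- ===== VERDICT (by name: the statement is the Claim_ definition above) =====
theorem change_pos_spec : Claim_equal_change_pos := by
  intro X _
  unfold Spec_change_pos change_pos change_pos_alt
  set l := X.toList with hl
  rcases tidy_char l '1' 0 with ⟨hnv, heq⟩ | ⟨m, v, r, hdec, hnv, hvlt, heq⟩
  · -- tidy: A's reversed loop skips everything, B finishes the loop; both 0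
    rw [heq, altGo_noViol l '1' 0 0 hnv]
    have : revGo (l.length : Int) ((l.length : Int) - 0) l.reverse '9' 0 = 0 := by
      rw [show l.reverse = l.reverse ++ [] by simp]
      rw [revGo_skip _ _ l.reverse [] '9' 0 (by simp)]
      rfl
    simpa using this
  · -- violation at pos = m.length
    rw [heq]
    have hlen : (l.length : Int) = (m.length : Int) + (r.length : Int) + 1 := by
      rw [hdec]; push_cast [List.length_append, List.length_cons]; omega
    have hrev : l.reverse = (v :: r).reverse ++ m.reverse := by
      rw [hdec, List.reverse_append]
    rw [hrev, revGo_skip _ _ _ _ '9' 0 (by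
      simp only [List.length_reverse, List.length_cons]; push_cast; omega)]
    have hgl : (v :: r).reverse.getLastD '9' = v := by
      simp only [List.reverse_cons]
      exact List.getLastD_concat
    rw [hgl, revGo_scan _ _ _ _ _ (le_refl _)]
    have hp : (l.length : Int) - ((l.length : Int) - (0 + (m.length : Int))) = (m.length : Int) := by
      omega
    rw [hp]
    rw [bscan_rev m v '1']
    rw [hdec, altGo_viol m v r '1' 0 0 hnv hvlt]
    cases hm : m.getLast? with
    | none => rfl
    | some w =>
      dsimp only
      have hwD : m.getLastD '1' = w := by rw [List.getLastD_eq_getLast?, hm]; rfl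
      rw [if_neg (by rw [← hwD]; exact lt_asymm hvlt)]
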